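-- pv_equiv track=rewrite | github.com/Naylepsh/MP-egzamin-lic-inz | 2020-luty/01.py | belongs_to_lang
-- ===== SOURCE A (Python) =====
-- def belongs_to_lang(word):
--     if len(word) == 0:
--         return False
--
--     openedParenthesis = 0
--     prev = None
--
--     for x in word:
--         if x == '[':
--             openedParenthesis += 1
--             if prev not in ['[', '+', None]:
--                 return False
--         elif x == ']':
--             openedParenthesis -= 1
--             if prev not in [']', '0', None]:
--                 return False
--         elif x == '0':
--             if prev not in ['[', '+', None]:
--                 return False
--         elif x == '+':
--             if prev not in [']', '0', None]:
--                 return False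
--         else:
--             return False
--         prev = x
--
--     return openedParenthesis == 0
-- ===== SOURCE B (Python) =====
-- # Grammar-based re-implementation: split the word on '+' and pattern-match each
-- # segment with strip-based checks, then compare bracket counts for balance.
-- # A valid word is  (']'* | '['*'0'']'*) ('+' '['*'0'']'*)* ('+' '['*)?  with
-- # equally many '[' and ']'; segments between '+'s must be exactly '['*'0'']'*.
--
-- def _mid(seg):                      # seg matches '['* '0' ']'*
--     return seg.lstrip('[').rstrip(']') == '0'
--
-- def _run(seg, ch):                  # seg is a (possibly empty) run of ch
--     return all(c == ch for c in seg)
--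
-- def belongs_to_lang(word):
--     if not word or not all(c in '[]0+' for c in word):
--         return False
--     segs = word.split('+')
--     first, mids, last = segs[0], segs[1:-1], segs[-1]
--     if len(segs) == 1:
--         ok = _run(word, '[') or _run(word, ']') or _mid(word)
--     else:
--         ok = (_run(first, ']') or _mid(first)) and all(_mid(s) for s in mids) \
--              and (_run(last, '[') or _mid(last))
--     return ok and word.count('[') == word.count(']')
-- ===== Notes on version B (the rewrite author's own statement) =====
-- stated objective: alternative
-- what changed: Replaces A's single character-by-character state machine (prev char plus running bracket counter) by a grammar-based staged check: split the word on '+', pattern-match each segment against '['*'0'']'* or pure runs via lstrip/rstrip, and compare total '[' and ']' counts for the balance.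
import Mathlib
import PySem

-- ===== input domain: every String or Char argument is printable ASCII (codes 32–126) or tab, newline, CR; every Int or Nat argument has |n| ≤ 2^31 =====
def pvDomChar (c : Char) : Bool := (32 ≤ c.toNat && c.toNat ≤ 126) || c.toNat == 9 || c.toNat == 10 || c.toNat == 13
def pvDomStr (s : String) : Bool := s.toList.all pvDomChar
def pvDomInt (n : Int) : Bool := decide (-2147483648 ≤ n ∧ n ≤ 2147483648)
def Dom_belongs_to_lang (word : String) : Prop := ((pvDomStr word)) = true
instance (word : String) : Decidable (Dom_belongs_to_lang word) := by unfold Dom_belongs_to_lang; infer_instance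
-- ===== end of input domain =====

-- B replaces A's char-by-char state machine (prev char + running counter) by a
-- grammar-based staged check: split on '+', strip-based per-segment pattern
-- matching, and a count comparison for balance (objective: alternative).
-- ===== PORT A =====
-- A: single loop keeping an incremental bracket counter and the previous char.
def pvLoopA (l : List Char) (opened : Int) (prev : Option Char) : Bool :=
  match l with
  | [] => opened == 0
  | x :: rest =>
    if x == '[' then
      if prev == some '[' || prev == some '+' || prev == none then
        pvLoopA rest (opened + 1) (some x)
      else false
    else if x == ']' then
      if prev == some ']' || prev == some '0' || prev == none then
        pvLoopA rest (opened - 1) (some x)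
      else false
    else if x == '0' then
      if prev == some '[' || prev == some '+' || prev == none then
        pvLoopA rest opened (some x)
      else false
    else if x == '+' then
      if prev == some ']' || prev == some '0' || prev == none then
        pvLoopA rest opened (some x)
      else false
    else false

def belongs_to_lang (word : String) : Bool :=
  if PySem.Str.len word == 0 then false
  else pvLoopA word.toList 0 none

-- ===== PORT B =====
-- B: split the word on '+', pattern-match each segment with strip-based checks,
-- then compare bracket counts for balance.

-- 'c in "[]0+"' for a single char (exact: membership in a 4-char string)
def pvAlpha (c : Char) : Bool := c == '[' || c == ']' || c == '0' || c == '+'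

-- str.split('+') with an explicit single-char separator (exact: every
-- occurrence splits, empty segments kept, result never empty)
def pvSplitPlus : List Char → List (List Char)
  | [] => [[]]
  | c :: t =>
    if c == '+' then [] :: pvSplitPlus t
    else
      match pvSplitPlus t with
      | [] => [[c]]            -- unreachable: pvSplitPlus never returns []
      | s :: ss => (c :: s) :: ss

-- seg.lstrip('[').rstrip(']') == '0'   (exact: lstrip/rstrip with a one-char
-- set = dropWhile from the respective end)
def pvMid (s : List Char) : Bool :=
  ((s.dropWhile (· == '[')).reverse.dropWhile (· == ']')).reverse == ['0']

-- all(c == ch for c in seg)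
def pvRun (s : List Char) (ch : Char) : Bool := s.all (· == ch)

def belongs_to_lang_alt (word : String) : Bool :=
  let l := word.toList
  if l.isEmpty || !(l.all pvAlpha) then false
  else
    let segs := pvSplitPlus l
    let first := segs.headD []
    let mids := (segs.drop 1).dropLast
    let last := segs.getLastD []
    let ok :=
      if segs.length == 1 then pvRun l '[' || pvRun l ']' || pvMid l
      else (pvRun first ']' || pvMid first) && mids.all pvMid
             && (pvRun last '[' || pvMid last)
    ok && (PySem.Str.count word "[" == PySem.Str.count word "]")

-- ===== PRECONDITION & SPEC =====
def Spec_belongs_to_lang (word : String) (out : Bool) : Prop := out = belongs_to_lang_alt word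
instance (word : String) (out : Bool) : Decidable (Spec_belongs_to_lang word out) := by unfold Spec_belongs_to_lang; infer_instance

-- ===== CLAIM (what is proved, stated in full; the proofs are below) =====
def Claim_equal_belongs_to_lang : Prop := ∀ (word : String), Dom_belongs_to_lang word → Spec_belongs_to_lang word (belongs_to_lang word)

-- ===== LEMMAS AND PROOFS =====

-- the adjacency-chain part of A's loop, without the counter
def pvValid : List Char → Option Char → Bool
  | [], _ => true
  | x :: rest, prev =>
    if x == '[' then
      ((prev == some '[' || prev == some '+' || prev == none) && pvValid rest (some x))
    else if x == ']' then
      ((prev == some ']' || prev == some '0' || prev == none) && pvValid rest (some x))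
    else if x == '0' then
      ((prev == some '[' || prev == some '+' || prev == none) && pvValid rest (some x))
    else if x == '+' then
      ((prev == some ']' || prev == some '0' || prev == none) && pvValid rest (some x))
    else false

-- two-mode acceptor: mode true = after '['/'+' (expect '[' or '0'),
-- mode false = after ']'/'0' (expect ']' or '+')
def pvPhase : Bool → List Char → Bool
  | _, [] => true
  | true, c :: t => if c == '[' then pvPhase true t else if c == '0' then pvPhase false t else false
  | false, c :: t => if c == ']' then pvPhase false t else if c == '+' then pvPhase true t else false

-- inverse of pvSplitPlus
def pvJoin : List (List Char) → List Char
  | [] => []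
  | [s] => s
  | s :: s' :: ss => s ++ '+' :: pvJoin (s' :: ss)

-- segment-list evaluators for the two phases
def pvTailOpen : List (List Char) → Bool
  | [] => true
  | [s] => pvRun s '[' || pvMid s
  | s :: s' :: ss => pvMid s && pvTailOpen (s' :: ss)

def pvFirstClose : List (List Char) → Bool
  | [] => true
  | [s] => pvRun s ']'
  | s :: s' :: ss => pvRun s ']' && pvTailOpen (s' :: ss)

-- str.count with a single-char needle is List.count
theorem pv_count_go_single (c : Char) :
    ∀ (fuel : Nat) (l : List Char) (acc : Nat), l.length ≤ fuel →
      PySem.Chars.count.go [c] fuel l acc = acc + l.count c := by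
  intro fuel
  induction fuel with
  | zero =>
    intro l acc h
    have : l = [] := List.eq_nil_of_length_eq_zero (Nat.le_zero.mp h)
    subst this
    simp [PySem.Chars.count.go]
  | succ n ih =>
    intro l acc h
    cases l with
    | nil => simp [PySem.Chars.count.go]
    | cons y t =>
      by_cases hy : y = c
      · subst hy
        have hpre : List.isPrefixOf [y] (y :: t) = true := by
          simp [List.isPrefixOf]
        simp only [PySem.Chars.count.go, hpre, if_true]
        rw [show List.drop [y].length (y :: t) = t from rfl]
        rw [ih t (acc + 1) (Nat.lt_succ_iff.mp (by simpa using h))]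
        simp
        omega
      · have hpre : List.isPrefixOf [c] (y :: t) = false := by
          simp [List.isPrefixOf]
          intro hc; exact hy hc.symm
        simp only [PySem.Chars.count.go, hpre, Bool.false_eq_true, if_false]
        rw [ih t acc (Nat.lt_succ_iff.mp (by simpa using h))]
        simp [hy]

theorem pv_chars_count_single (c : Char) (l : List Char) :
    PySem.Chars.count l [c] = l.count c := by
  simp only [PySem.Chars.count, List.isEmpty_cons, Bool.false_eq_true, if_false]
  simpa using pv_count_go_single c l.length l 0 (le_refl _)

-- A's loop = adjacency chain && final balance of the remaining suffix
theorem pv_loop_eq (l : List Char) :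
    ∀ (opened : Int) (prev : Option Char),
      pvLoopA l opened prev
        = (pvValid l prev
            && decide (opened + (l.count '[' : Int) - (l.count ']' : Int) = 0)) := by
  induction l with
  | nil =>
    intro opened prev
    simp only [pvLoopA, pvValid, List.count_nil, Nat.cast_zero, Bool.true_and]
    rw [show (opened + 0 - 0 : Int) = opened from by ring]
    rfl
  | cons x rest ih =>
    intro opened prev
    by_cases h1 : x = '['
    · subst h1
      simp only [pvLoopA, pvValid, beq_self_eq_true, if_true]
      cases hc : (prev == some '[' || prev == some '+' || prev == none) with
      | false => simp
      | true =>
        simp only [if_true, Bool.true_and, ih, List.count_cons, beq_self_eq_true]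
        have : ('[' == ']') = false := rfl
        simp only [this, if_false, Bool.false_eq_true]
        congr 1
        rw [decide_eq_decide]
        push_cast
        constructor <;> intro <;> omega
    · by_cases h2 : x = ']'
      · subst h2
        have e1 : (']' == '[') = false := rfl
        simp only [pvLoopA, pvValid, e1, Bool.false_eq_true, if_false,
          beq_self_eq_true, if_true]
        cases hc : (prev == some ']' || prev == some '0' || prev == none) with
        | false => simp
        | true =>
          simp only [if_true, Bool.true_and, ih, List.count_cons, beq_self_eq_true, e1]
          simp only [Bool.false_eq_true, if_false]
          congr 1
          rw [decide_eq_decide]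
          push_cast
          constructor <;> intro <;> omega
      · by_cases h3 : x = '0'
        · subst h3
          have e1 : (('0' : Char) == '[') = false := rfl
          have e2 : (('0' : Char) == ']') = false := rfl
          simp only [pvLoopA, pvValid, e1, e2, Bool.false_eq_true, if_false,
            beq_self_eq_true, if_true]
          cases hc : (prev == some '[' || prev == some '+' || prev == none) with
          | false => simp
          | true =>
            simp only [if_true, Bool.true_and, ih, List.count_cons, e1, e2]
            simp only [Bool.false_eq_true, if_false, Nat.add_zero]
        · by_cases h4 : x = '+'
          · subst h4
            have e1 : (('+' : Char) == '[') = false := rfl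
            have e2 : (('+' : Char) == ']') = false := rfl
            have e3 : (('+' : Char) == '0') = false := rfl
            simp only [pvLoopA, pvValid, e1, e2, e3, Bool.false_eq_true, if_false,
              beq_self_eq_true, if_true]
            cases hc : (prev == some ']' || prev == some '0' || prev == none) with
            | false => simp
            | true =>
              simp only [if_true, Bool.true_and, ih, List.count_cons, e1, e2]
              simp only [Bool.false_eq_true, if_false, Nat.add_zero]
          · have e1 : (x == '[') = false := by simp [h1]
            have e2 : (x == ']') = false := by simp [h2]
            have e3 : (x == '0') = false := by simp [h3]
            have e4 : (x == '+') = false := by simp [h4]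
            simp only [pvLoopA, pvValid, e1, e2, e3, e4, Bool.false_eq_true, if_false]
            simp

-- a word with a char outside the alphabet fails the chain from any state
theorem pv_valid_foreign : ∀ (l : List Char), l.all pvAlpha = false →
    ∀ prev, pvValid l prev = false := by
  intro l
  induction l with
  | nil => intro h; simp at h
  | cons c t ih =>
    intro h prev
    rw [List.all_cons] at h
    rcases Bool.and_eq_false_iff.mp h with hc | ht
    · have hc' : ((¬c = '[' ∧ ¬c = ']') ∧ ¬c = '0') ∧ ¬c = '+' := by
        simpa [pvAlpha] using hc
      simp [pvValid, hc'.1.1.1, hc'.1.1.2, hc'.1.2, hc'.2]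
    · simp [pvValid, ih ht]

-- the chain after a seen char is a phase run
theorem pv_valid_phase : ∀ (l : List Char),
    pvValid l (some '[') = pvPhase true l ∧ pvValid l (some '+') = pvPhase true l ∧
    pvValid l (some ']') = pvPhase false l ∧ pvValid l (some '0') = pvPhase false l := by
  intro l
  induction l with
  | nil => exact ⟨rfl, rfl, rfl, rfl⟩
  | cons c t ih =>
    refine ⟨?_, ?_, ?_, ?_⟩ <;>
    · by_cases h1 : c = '['
      · subst h1; simp [pvValid, pvPhase, ih.1]
      · by_cases h2 : c = ']'
        · subst h2; simp [pvValid, pvPhase, ih.2.2.1]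
        · by_cases h3 : c = '0'
          · subst h3; simp [pvValid, pvPhase, ih.2.2.2]
          · by_cases h4 : c = '+'
            · subst h4; simp [pvValid, pvPhase, ih.2.1]
            · simp [pvValid, pvPhase, h1, h2, h3, h4]

-- the whole chain from the start is "open run or close run"
theorem pv_valid_none : ∀ (l : List Char),
    pvValid l none = (pvPhase true l || pvPhase false l) := by
  intro l
  cases l with
  | nil => rfl
  | cons c t =>
    by_cases h1 : c = '['
    · subst h1; simp [pvValid, pvPhase, (pv_valid_phase t).1]
    · by_cases h2 : c = ']'
      · subst h2; simp [pvValid, pvPhase, (pv_valid_phase t).2.2.1]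
      · by_cases h3 : c = '0'
        · subst h3; simp [pvValid, pvPhase, (pv_valid_phase t).2.2.2]
        · by_cases h4 : c = '+'
          · subst h4; simp [pvValid, pvPhase, (pv_valid_phase t).2.1]
          · simp [pvValid, pvPhase, h1, h2, h3, h4]

-- dropWhile ']' of u ++ ['0'] is ['0'] exactly when u is all ']'
theorem pv_dw_zero (u : List Char) :
    (List.dropWhile (· == ']') (u ++ ['0']) = ['0']) ↔ (∀ x ∈ u, x = ']') := by
  induction u with
  | nil => simp
  | cons c u' ih =>
    by_cases hc : c = ']'
    · subst hc; simpa using ih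
    · simp [hc]

-- dropWhile ']' of u ++ [c] is never ['0'] when c ≠ '0'
theorem pv_dw_ne (u : List Char) (c : Char) (hc : c ≠ '0') :
    List.dropWhile (· == ']') (u ++ [c]) ≠ ['0'] := by
  induction u with
  | nil =>
    by_cases h : c = ']'
    · subst h; simp
    · simp [h, hc]
  | cons d u' ih =>
    by_cases hd : d = ']'
    · subst hd; simpa using ih
    · simp [hd]

theorem pv_rev_beq (X : List Char) : (X.reverse == ['0']) = (X == ['0']) := by
  rw [Bool.eq_iff_iff, beq_iff_eq, beq_iff_eq]
  exact ⟨fun h => by simpa using congrArg List.reverse h, fun h => by simp [h]⟩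

theorem pv_mid_nil : pvMid [] = false := by decide

theorem pv_mid_lb (t : List Char) : pvMid ('[' :: t) = pvMid t := by
  simp [pvMid]

theorem pv_mid_zero (t : List Char) : pvMid ('0' :: t) = pvRun t ']' := by
  have h0 : List.dropWhile (· == '[') ('0' :: t) = '0' :: t := by
    simp
  rw [pvMid, h0, pv_rev_beq, show ('0' :: t).reverse = t.reverse ++ ['0'] by simp]
  rw [Bool.eq_iff_iff, beq_iff_eq, pv_dw_zero]
  simp [pvRun, List.all_eq_true]

theorem pv_mid_other (c : Char) (t : List Char) (h1 : c ≠ '[') (h2 : c ≠ '0') :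
    pvMid (c :: t) = false := by
  have h0 : List.dropWhile (· == '[') (c :: t) = c :: t := by
    simp [h1]
  rw [pvMid, h0, pv_rev_beq, show (c :: t).reverse = t.reverse ++ [c] by simp]
  exact beq_eq_false_iff_ne.mpr (pv_dw_ne t.reverse c h2)

-- phases across a segment followed by '+'
theorem pv_phase_app : ∀ (s : List Char), '+' ∉ s → ∀ (t : List Char),
    pvPhase true (s ++ '+' :: t) = (pvMid s && pvPhase true t) ∧
    pvPhase false (s ++ '+' :: t) = (pvRun s ']' && pvPhase true t) := by
  intro s
  induction s with
  | nil => intro _ t; exact ⟨by simp [pvPhase, pv_mid_nil], by simp [pvPhase, pvRun]⟩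
  | cons c s' ih =>
    intro h t
    have hc : c ≠ '+' := fun hh => h (hh ▸ List.mem_cons_self ..)
    have h' : '+' ∉ s' := fun hh => h (List.mem_cons_of_mem _ hh)
    constructor
    · by_cases h1 : c = '['
      · subst h1; simpa [pvPhase, pv_mid_lb] using (ih h' t).1
      · by_cases h3 : c = '0'
        · subst h3
          simpa [pvPhase, pv_mid_zero, Bool.and_assoc] using (ih h' t).2
        · simp [pvPhase, h1, h3, pv_mid_other c s' h1 h3]
    · by_cases h2 : c = ']'
      · subst h2; simpa [pvPhase, pvRun, Bool.and_assoc] using (ih h' t).2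
      · simp [pvPhase, pvRun, h2, hc]

-- phases of a '+'-free segment alone
theorem pv_phase_seg : ∀ (s : List Char), '+' ∉ s →
    pvPhase true s = (pvRun s '[' || pvMid s) ∧ pvPhase false s = pvRun s ']' := by
  intro s
  induction s with
  | nil => exact fun _ => ⟨by simp [pvPhase, pvRun], by simp [pvPhase, pvRun]⟩
  | cons c s' ih =>
    intro h
    have hc : c ≠ '+' := fun hh => h (hh ▸ List.mem_cons_self ..)
    have h' : '+' ∉ s' := fun hh => h (List.mem_cons_of_mem _ hh)
    constructor
    · by_cases h1 : c = '['
      · subst h1; simp [pvPhase, pvRun, pv_mid_lb, (ih h').1]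
      · by_cases h3 : c = '0'
        · subst h3; simp [pvPhase, pvRun, pv_mid_zero, (ih h').2]
        · simp [pvPhase, pvRun, h1, h3, pv_mid_other c s' h1 h3]
    · by_cases h2 : c = ']'
      · subst h2; simp [pvPhase, pvRun, (ih h').2]
      · simp [pvPhase, pvRun, h2, hc]

-- split: never empty, joins back, segments are '+'-free
theorem pv_split_spec : ∀ (l : List Char),
    pvSplitPlus l ≠ [] ∧ pvJoin (pvSplitPlus l) = l ∧ ∀ s ∈ pvSplitPlus l, '+' ∉ s := by
  intro l
  induction l with
  | nil => exact ⟨by simp [pvSplitPlus], rfl, by simp [pvSplitPlus]⟩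
  | cons c t ih =>
    obtain ⟨hne, hj, hf⟩ := ih
    by_cases hc : c = '+'
    · subst hc
      refine ⟨by simp [pvSplitPlus], ?_, ?_⟩
      · cases hs : pvSplitPlus t with
        | nil => exact absurd hs hne
        | cons s ss =>
          simp only [pvSplitPlus, beq_self_eq_true, if_true, hs, pvJoin]
          rw [← hs, hj]
          rfl
      · intro s hs
        simp only [pvSplitPlus, beq_self_eq_true, if_true, List.mem_cons] at hs
        rcases hs with rfl | hs
        · simp
        · exact hf s hs
    · cases hs : pvSplitPlus t with
      | nil => exact absurd hs hne
      | cons s ss =>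
        have hb : (c == '+') = false := by simp [hc]
        refine ⟨?_, ?_, ?_⟩
        · simp [pvSplitPlus, hb, hs]
        · simp only [pvSplitPlus, hb, Bool.false_eq_true, if_false, hs]
          cases ss with
          | nil =>
            simp only [pvJoin]
            rw [hs] at hj
            simpa [pvJoin] using congrArg (c :: ·) hj
          | cons s2 ss2 =>
            simp only [pvJoin, List.cons_append]
            rw [hs] at hj
            simpa [pvJoin] using congrArg (c :: ·) hj
        · intro x hx
          simp only [pvSplitPlus, hb, Bool.false_eq_true, if_false, hs, List.mem_cons] at hx
          rcases hx with rfl | hx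
          · intro hmem
            rcases List.mem_cons.mp hmem with h | h
            · exact hc h.symm
            · exact hf s (by rw [hs]; exact List.mem_cons_self ..) h
          · exact hf x (by rw [hs]; exact List.mem_cons_of_mem _ hx)

-- phases of a joined segment list
theorem pv_join_phase : ∀ (ss : List (List Char)), ss ≠ [] → (∀ s ∈ ss, '+' ∉ s) →
    pvPhase true (pvJoin ss) = pvTailOpen ss ∧
    pvPhase false (pvJoin ss) = pvFirstClose ss := by
  intro ss
  induction ss with
  | nil => intro h; exact absurd rfl h
  | cons s rest ih =>
    intro _ hf
    have hs : '+' ∉ s := hf s (List.mem_cons_self ..)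
    cases rest with
    | nil =>
      exact ⟨by simpa [pvJoin, pvTailOpen] using (pv_phase_seg s hs).1,
             by simpa [pvJoin, pvFirstClose] using (pv_phase_seg s hs).2⟩
    | cons s2 rest2 =>
      have ihh := ih (by simp) (fun x hx => hf x (List.mem_cons_of_mem _ hx))
      constructor
      · rw [show pvJoin (s :: s2 :: rest2) = s ++ '+' :: pvJoin (s2 :: rest2) from rfl,
          (pv_phase_app s hs _).1, ihh.1]
        rfl
      · rw [show pvJoin (s :: s2 :: rest2) = s ++ '+' :: pvJoin (s2 :: rest2) from rfl,
          (pv_phase_app s hs _).2, ihh.1]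
        rfl

-- pvTailOpen as B computes it: all mids match, last is a '['-run or a mid
theorem pv_tailopen_eq : ∀ (ss : List (List Char)), ss ≠ [] →
    pvTailOpen ss
      = (ss.dropLast.all pvMid && (pvRun (ss.getLastD []) '[' || pvMid (ss.getLastD []))) := by
  intro ss
  induction ss with
  | nil => intro h; exact absurd rfl h
  | cons s rest ih =>
    intro _
    cases rest with
    | nil => simp [pvTailOpen]
    | cons s2 rest2 =>
      rw [show pvTailOpen (s :: s2 :: rest2) = (pvMid s && pvTailOpen (s2 :: rest2)) from rfl,
        ih (by simp)]
      simp [List.getLastD_eq_getLast?, Bool.and_assoc]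

-- balance: A's running-counter test equals B's count comparison
theorem pv_balance (word : String) (l : List Char) (h : word.toList = l) :
    decide ((0 : Int) + (l.count '[' : Int) - (l.count ']' : Int) = 0)
      = (PySem.Str.count word "[" == PySem.Str.count word "]") := by
  subst h
  rw [PySem.Str.count_eq, PySem.Str.count_eq]
  have hl : ("[" : String).toList = ['['] := rfl
  have hr : ("]" : String).toList = [']'] := rfl
  rw [hl, hr, pv_chars_count_single, pv_chars_count_single]
  generalize word.toList.count '[' = a
  generalize word.toList.count ']' = b
  by_cases h : a = b
  · subst h; simp
  · have hb : (a == b) = false := by simp [h]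
    rw [hb]
    exact decide_eq_false (by omega)

-- ===== VERDICT (by name: the statement is the Claim_ definition above) =====
theorem belongs_to_lang_spec : Claim_equal_belongs_to_lang := by
  intro word _
  unfold Spec_belongs_to_lang belongs_to_lang belongs_to_lang_alt
  cases hl : word.toList with
  | nil =>
    have hw : word = "" := by simpa using hl
    subst hw
    decide
  | cons c t =>
    have h0 : (PySem.Str.len word == 0) = false := by
      simp [hl]
      omega
    rw [h0]
    simp only [Bool.false_eq_true, if_false]
    cases hall : (c :: t).all pvAlpha with
    | false =>
      rw [pv_loop_eq, pv_valid_foreign _ hall]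
      simp only [Bool.not_false, Bool.or_true, if_true, Bool.false_and]
    | true =>
      rw [pv_loop_eq, pv_valid_none, pv_balance word _ hl]
      simp only [List.isEmpty_cons, Bool.not_true, Bool.or_false, Bool.false_eq_true,
        if_false]
      obtain ⟨hne, hjoin, hfree⟩ := pv_split_spec (c :: t)
      cases hs : pvSplitPlus (c :: t) with
      | nil => exact absurd hs hne
      | cons s ss =>
        rw [hs] at hjoin hfree
        have hph := pv_join_phase (s :: ss) (by simp) hfree
        rw [hjoin] at hph
        rw [hph.1, hph.2]
        cases ss with
        | nil =>
          have hseq : s = c :: t := by simpa [pvJoin] using hjoin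
          subst hseq
          simp only [pvTailOpen, pvFirstClose, List.length_cons, List.length_nil]
          simp only [Nat.zero_add, beq_self_eq_true, if_true]
          congr 1
          generalize pvRun (c :: t) '[' = a
          generalize pvRun (c :: t) ']' = b
          generalize pvMid (c :: t) = m
          cases a <;> cases b <;> cases m <;> rfl
        | cons s2 ss2 =>
          rw [show pvTailOpen (s :: s2 :: ss2) = (pvMid s && pvTailOpen (s2 :: ss2)) from rfl,
            show pvFirstClose (s :: s2 :: ss2) = (pvRun s ']' && pvTailOpen (s2 :: ss2)) from rfl,
            pv_tailopen_eq (s2 :: ss2) (by simp)]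
          have hlen : (((s :: s2 :: ss2).length : Nat) == 1) = false := by simp
          rw [hlen]
          simp only [Bool.false_eq_true, if_false, List.headD_cons, List.drop_succ_cons,
            List.drop_zero]
          congr 1
          have hgl : (s :: s2 :: ss2).getLastD [] = (s2 :: ss2).getLastD [] := by
            simp [List.getLastD_eq_getLast?]
          rw [hgl]
          generalize pvMid s = m
          generalize pvRun s ']' = b
          generalize (s2 :: ss2).dropLast.all pvMid = q
          generalize (pvRun ((s2 :: ss2).getLastD []) '[' || pvMid ((s2 :: ss2).getLastD [])) = r
          cases m <;> cases b <;> cases q <;> cases r <;> rfl
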